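-- pv_equiv track=rewrite | github.com/infideleraser/UsefulJacksonTools | dashtocolon.py | dashtocolon
-- ===== SOURCE A (Python) =====
-- def dashtocolon(string):
-- 	a=string.split('-')
-- 	i=0
-- 	ans=''
-- 	while i<len(a):
-- 		ans+=a[i]+':'
-- 		i+=1
-- 	return ans[:-1]
-- ===== SOURCE B (Python) =====
-- def dashtocolon(string):
-- 	return ''.join(':' if c == '-' else c for c in string)
-- ===== Notes on version B (the rewrite author's own statement) =====
-- stated objective: idiomatic
-- what changed: B makes one character-by-character pass that substitutes a colon for each dash and joins the characters, instead of A's tokenize on the dash delimiter, index-driven while loop appending each token plus a colon, and trailing-character slice trim.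
import Mathlib
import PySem

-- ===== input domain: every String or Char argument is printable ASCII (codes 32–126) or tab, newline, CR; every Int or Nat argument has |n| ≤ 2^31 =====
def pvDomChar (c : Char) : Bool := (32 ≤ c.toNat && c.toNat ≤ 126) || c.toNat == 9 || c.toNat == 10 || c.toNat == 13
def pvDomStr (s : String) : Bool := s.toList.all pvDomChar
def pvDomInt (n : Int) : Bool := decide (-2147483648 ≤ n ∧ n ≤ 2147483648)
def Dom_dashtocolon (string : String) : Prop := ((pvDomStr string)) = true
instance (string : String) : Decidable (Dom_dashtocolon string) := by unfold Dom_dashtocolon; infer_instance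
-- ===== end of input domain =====

-- B replaces A's split-on-'-' / indexed while-loop-join / trailing-slice with a single per-character pass; objective: idiomatic.

-- ===== PORT A =====
-- a = string.split('-'); while i < len(a): ans += a[i] + ':';  return ans[:-1]
def dashtocolon (string : String) : String :=
  let a : List (List Char) := PySem.Chars.splitOn string.toList "-".toList
  let ans : List Char := a.foldl (fun ans t => ans ++ (t ++ [':'])) []
  String.ofList (PySem.List.slice ans none (some (-1)))

-- ===== PORT B =====
-- ''.join(':' if c == '-' else c for c in string)
def dashtocolon_alt (string : String) : String :=
  String.ofList (string.toList.map (fun c => if c = '-' then ':' else c))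

-- ===== PRECONDITION & SPEC =====
def Spec_dashtocolon (string : String) (out : String) : Prop := out = dashtocolon_alt string
instance (string : String) (out : String) : Decidable (Spec_dashtocolon string out) := by unfold Spec_dashtocolon; infer_instance

-- ===== CLAIM (what is proved, stated in full; the proofs are below) =====
def Claim_equal_dashtocolon : Prop := ∀ (string : String), Dom_dashtocolon string → Spec_dashtocolon string (dashtocolon string)

-- ===== LEMMAS AND PROOFS =====

-- flattened ':'-joined image of splitOn.go with single-char separator '-', given enough fuel
theorem pv_go_flat (fuel : Nat) (l cur : List Char) (acc : List (List Char))
    (hf : l.length ≤ fuel) :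
    (PySem.Chars.splitOn.go ['-'] fuel l cur acc).flatMap (fun t => t ++ [':'])
      = acc.reverse.flatMap (fun t => t ++ [':']) ++ cur.reverse
        ++ l.map (fun c => if c = '-' then ':' else c) ++ [':'] := by
  induction fuel generalizing l cur acc with
  | zero =>
    have hl : l = [] := List.eq_nil_of_length_eq_zero (Nat.le_zero.mp hf)
    subst hl
    simp [PySem.Chars.splitOn.go]
  | succ n ih =>
    cases l with
    | nil => simp [PySem.Chars.splitOn.go]
    | cons c rest =>
      rw [PySem.Chars.splitOn.go]
      by_cases hc : c = '-'
      · subst hc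
        have : List.isPrefixOf ['-'] ('-' :: rest) = true := by
          simp [List.isPrefixOf]
        rw [if_pos this]
        rw [ih _ _ _ (by simpa using Nat.le_of_succ_le_succ hf)]
        simp
      · have : List.isPrefixOf ['-'] (c :: rest) = false := by
          simp [List.isPrefixOf]; exact fun h => hc h.symm
        rw [if_neg (by simp [this])]
        rw [ih _ _ _ (by simpa using Nat.le_of_succ_le_succ hf)]
        simp [hc]

-- ===== VERDICT (by name: the statement is the Claim_ definition above) =====
theorem dashtocolon_spec : Claim_equal_dashtocolon := by
  intro string _
  unfold Spec_dashtocolon dashtocolon dashtocolon_alt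
  simp only []
  rw [PySem.List.slice_to_neg_one]
  rw [PySem.List.foldl_append_eq_flatMap]
  have h := pv_go_flat (string.toList.length + 1) string.toList [] []
    (Nat.le_succ _)
  simp only [PySem.Chars.splitOn]
  show String.ofList (([] ++ (PySem.Chars.splitOn.go "-".toList (string.toList.length + 1)
      string.toList [] []).flatMap fun t => t ++ [':']).dropLast) = _
  simp only [List.nil_append]
  have hsep : "-".toList = ['-'] := rfl
  rw [hsep, h]
  simp
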